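-- pv_equiv track=rewrite | github.com/Vivicoubar/AOC2024 | AOC25/day25.py | try_key
-- ===== SOURCE A (Python) =====
-- def try_key(key, lock) -> bool:
--     max_rows = len(key)
--     max_col = len(key[0])
--     for row in range(max_rows):
--         for col in range(max_col):
--             if key[row][col] == "#" and lock[row][col] == "#":
--                 return False
--     return True
-- ===== SOURCE B (Python) =====
-- def try_key(key, lock) -> bool:
--     cols = len(key[0])
--     for r in range(len(key)):
--         row = key[r]
--         pos = row.find("#")
--         while 0 <= pos < cols:
--             if lock[r][pos] == "#":
--                 return False
--             pos = row.find("#", pos + 1)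
--     return True
-- ===== Notes on version B (the rewrite author's own statement) =====
-- stated objective: alternative
-- what changed: Replaces A's dense nested index-scan over every cell by a sparse skip-scan: per row a while-loop jumps directly between the '#' positions of the key row using str.find(sub, start) and consults lock only at those positions.
import Mathlib
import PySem

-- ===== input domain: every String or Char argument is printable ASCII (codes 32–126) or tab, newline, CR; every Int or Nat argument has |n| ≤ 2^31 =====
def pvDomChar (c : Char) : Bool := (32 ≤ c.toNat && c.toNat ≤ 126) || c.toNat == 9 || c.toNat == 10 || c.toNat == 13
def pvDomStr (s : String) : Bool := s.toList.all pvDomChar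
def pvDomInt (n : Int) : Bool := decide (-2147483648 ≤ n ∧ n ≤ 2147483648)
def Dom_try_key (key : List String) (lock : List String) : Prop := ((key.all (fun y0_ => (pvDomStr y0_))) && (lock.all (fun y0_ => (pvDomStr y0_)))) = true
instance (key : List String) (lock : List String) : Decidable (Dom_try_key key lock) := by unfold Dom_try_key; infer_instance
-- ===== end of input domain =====

-- B replaces A's dense per-cell nested scan by a sparse skip-scan that jumps between the key
-- row's '#' positions with str.find(sub, start) and reads lock only there; same worst-case cost.


-- shared cell accessor: grid[r][c] == '#' (total form of Python's indexing; in range under Pre_)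
def pvHash (xs : List String) (r c : Int) : Bool :=
  PySem.List.pyGetD (PySem.List.pyGetD xs r "").toList c ' ' == '#'

-- ===== PORT A =====
-- inner 'for col in range(max_col)' with early 'return False'
def pvColLoop (key lock : List String) (r : Int) : List Int → Bool
  | [] => true
  | c :: cs => if pvHash key r c && pvHash lock r c then false else pvColLoop key lock r cs

-- outer 'for row in range(max_rows)', propagating the early return
def pvRowLoop (key lock : List String) (maxCol : Int) : List Int → Bool
  | [] => true
  | r :: rs =>
    if pvColLoop key lock r (PySem.List.pyRange 0 maxCol 1) = false then false
    else pvRowLoop key lock maxCol rs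

def try_key (key : List String) (lock : List String) : Bool :=
  let maxRows : Int := key.length
  let maxCol : Int := (PySem.List.pyGetD key 0 "").toList.length
  pvRowLoop key lock maxCol (PySem.List.pyRange 0 maxRows 1)

-- ===== PORT B =====
-- the 'while 0 <= pos < cols' skip-scan over one key row; pos = row.find('#', start) positions;
-- fuel (row.length + 1) is a totality device only: pos strictly increases inside [0, row.length)
def pvScan (lock : List String) (r cols : Int) (row : List Char) : Nat → Int → Bool
  | 0, _ => true
  | fuel + 1, pos =>
    if 0 ≤ pos ∧ pos < cols then
      if pvHash lock r pos then false
      else pvScan lock r cols row fuel (PySem.Chars.findFrom row ['#'] (pos + 1) none)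
    else true

-- 'for r in range(len(key))' with early 'return False'
def pvRowLoopB (key lock : List String) (cols : Int) : List Int → Bool
  | [] => true
  | r :: rs =>
    let row := (PySem.List.pyGetD key r "").toList
    if pvScan lock r cols row (row.length + 1) (PySem.Chars.find row ['#']) = false then false
    else pvRowLoopB key lock cols rs

def try_key_alt (key : List String) (lock : List String) : Bool :=
  let cols : Int := (PySem.List.pyGetD key 0 "").toList.length
  pvRowLoopB key lock cols (PySem.List.pyRange 0 (key.length : Int) 1)

-- ===== PRECONDITION & SPEC =====
-- the read of cell (r, c) fails in A: key row r too short, or key has '#' there and lock lacks the cell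
def pvFail (key lock : List String) (r c : Nat) : Bool :=
  decide ((key.getD r "").toList.length ≤ c) ||
    ((key.getD r "").toList.getD c ' ' == '#' &&
      (decide (lock.length ≤ r) || decide ((lock.getD r "").toList.length ≤ c)))

-- cell (r, c) is an overlap: both grids hold '#' there (all four reads in range)
def pvOverlap (key lock : List String) (r c : Nat) : Bool :=
  decide (c < (key.getD r "").toList.length) && (key.getD r "").toList.getD c ' ' == '#' &&
    decide (r < lock.length) && decide (c < (lock.getD r "").toList.length) &&
    (lock.getD r "").toList.getD c ' ' == '#'

-- Pre_ holds exactly where Python A returns normally: it excludes an empty key and every input on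
-- which A's row-major scan reaches an out-of-range read (a key row shorter than the first, or a
-- lock missing the cell under a key '#') before any overlap has returned False — IndexError there.
def Pre_try_key (key : List String) (lock : List String) : Prop :=
  key ≠ [] ∧
  ∀ r < key.length, ∀ c < (key.headD "").toList.length,
    pvFail key lock r c = true →
    ∃ r' < key.length, ∃ c' < (key.headD "").toList.length,
      (r' < r ∨ (r' = r ∧ c' < c)) ∧ pvOverlap key lock r' c' = true
instance (key : List String) (lock : List String) : Decidable (Pre_try_key key lock) := by unfold Pre_try_key; infer_instance

def pvWitness_try_key : List String × List String := (["#.", ".."], [".#", "#."])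

def Spec_try_key (key : List String) (lock : List String) (out : Bool) : Prop := out = try_key_alt key lock
instance (key : List String) (lock : List String) (out : Bool) : Decidable (Spec_try_key key lock out) := by unfold Spec_try_key; infer_instance

-- ===== CLAIM (what is proved, stated in full; the proofs are below) =====
def Claim_equal_try_key : Prop := ∀ (key : List String) (lock : List String), Dom_try_key key lock → Pre_try_key key lock → Spec_try_key key lock (try_key key lock)

-- ===== LEMMAS AND PROOFS =====

-- [a] is a prefix of l iff l starts with a
lemma pvSingleton_prefix_iff (l : List Char) (a : Char) : [a] <+: l ↔ l.head? = some a := by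
  cases l with
  | nil => simp
  | cons b t => simp [List.cons_prefix_cons, eq_comm]

-- ['#'] before position i of row ↔ the totalized cell read sees '#'
lemma pvPrefix_drop_iff (row : List Char) (i : Nat) :
    ['#'] <+: row.drop i ↔ row.getD i ' ' = '#' := by
  rw [pvSingleton_prefix_iff, List.head?_drop, List.getD]
  cases h : row[i]? <;> simp

-- '#' at column c ≥ k of row puts '#' into row.drop k
lemma pvMem_drop_of_cell (row : List Char) (k c : Nat) (hkc : k ≤ c)
    (hcr : row.getD c ' ' = '#') : '#' ∈ row.drop k := by
  have hclen : c < row.length := by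
    by_contra hcl
    rw [List.getD_eq_default row ' ' (by omega)] at hcr
    exact absurd hcr (by decide)
  rw [List.getD_eq_getElem row ' ' hclen] at hcr
  rw [List.mem_iff_getElem]
  exact ⟨c - k, by simp; omega, by rw [List.getElem_drop]; convert hcr using 2; omega⟩

-- the skip-scan started at the first '#' at-or-after k decides "no overlap at any c ≥ k"
lemma pvScan_iff (lock : List String) (r cols : Int) (row : List Char) :
    ∀ (fuel k : Nat), k ≤ row.length → row.length + 1 - k ≤ fuel →
      (pvScan lock r cols row fuel (PySem.Chars.findFrom row ['#'] (k : Int) none) = true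
        ↔ ∀ c : Nat, k ≤ c → (c : Int) < cols → row.getD c ' ' = '#' →
            pvHash lock r (c : Int) = false) := by
  intro fuel
  induction fuel with
  | zero => intro k hk hf; omega
  | succ fuel ih =>
    intro k hk hf
    by_cases hneg : PySem.Chars.findFrom row ['#'] (k : Int) none = -1
    · have hninf : ¬ ('#' ∈ row.drop k) := by
        rw [← List.singleton_infix_iff]
        exact (PySem.Chars.findFrom_natCast_eq_neg_one_iff row ['#'] k hk).1 hneg
      rw [hneg]
      simp only [pvScan, if_neg (show ¬ ((0:Int) ≤ -1 ∧ (-1:Int) < cols) from by omega)]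
      refine ⟨fun _ c hkc _ hcr => absurd (pvMem_drop_of_cell row k c hkc hcr) hninf,
        fun _ => trivial⟩
    · obtain ⟨hkp, hpre, hmin⟩ := PySem.Chars.findFrom_natCast_spec row ['#'] k hk hneg
      set pos := PySem.Chars.findFrom row ['#'] (k : Int) none with hpos
      have h0p : (0:Int) ≤ pos := le_trans (by positivity) hkp
      have hcell : row.getD pos.toNat ' ' = '#' := (pvPrefix_drop_iff row pos.toNat).1 hpre
      have hplen : pos.toNat < row.length := by
        by_contra h
        rw [List.getD_eq_default row ' ' (by omega)] at hcell
        exact absurd hcell (by decide)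
      by_cases hlt : pos < cols
      · simp only [pvScan, if_pos (⟨h0p, hlt⟩ : (0:Int) ≤ pos ∧ pos < cols)]
        by_cases hlock : pvHash lock r pos = true
        · simp only [if_pos hlock, Bool.false_eq_true, false_iff, not_forall]
          refine ⟨pos.toNat, by omega, by omega, hcell, ?_⟩
          rw [Int.toNat_of_nonneg h0p, hlock]
          simp
        · simp only [if_neg hlock]
          rw [show pos + 1 = ((pos.toNat + 1 : Nat) : Int) from by omega]
          rw [ih (pos.toNat + 1) (by omega) (by omega)]
          constructor
          · intro h c hkc hcc hcr
            rcases lt_trichotomy c pos.toNat with hc | hc | hc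
            · exact absurd ((pvPrefix_drop_iff row c).2 hcr) (hmin c hkc hc)
            · rw [show ((c : Nat) : Int) = pos from by omega]
              simpa using hlock
            · exact h c (by omega) hcc hcr
          · intro h c hkc hcc hcr
            exact h c (by omega) hcc hcr
      · simp only [pvScan, if_neg (show ¬ ((0:Int) ≤ pos ∧ pos < cols) from fun hh => hlt hh.2)]
        refine ⟨fun _ c hkc hcc hcr => ?_, fun _ => trivial⟩
        have : c < pos.toNat := by omega
        exact absurd ((pvPrefix_drop_iff row c).2 hcr) (hmin c hkc this)

-- A's dense inner loop as an 'all' over the column range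
lemma pvColLoop_eq_all (key lock : List String) (r : Int) (cs : List Int) :
    pvColLoop key lock r cs = cs.all (fun c => !(pvHash key r c && pvHash lock r c)) := by
  induction cs with
  | nil => rfl
  | cons c cs ih =>
    simp only [pvColLoop, List.all_cons, ih]
    cases h : pvHash key r c && pvHash lock r c <;> simp

-- per row, the dense scan and the skip-scan agree
lemma pvRow_eq (key lock : List String) (cols : Int) (r : Int) :
    pvColLoop key lock r (PySem.List.pyRange 0 cols 1)
      = pvScan lock r cols ((PySem.List.pyGetD key r "").toList)
          ((PySem.List.pyGetD key r "").toList.length + 1)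
          (PySem.Chars.find ((PySem.List.pyGetD key r "").toList) ['#']) := by
  set row := (PySem.List.pyGetD key r "").toList with hrow
  have hB := pvScan_iff lock r cols row (row.length + 1) 0 (by omega) (by omega)
  rw [show ((0:Nat) : Int) = (0:Int) from rfl, PySem.Chars.findFrom_zero] at hB
  rw [pvColLoop_eq_all, Bool.eq_iff_iff, hB, List.all_eq_true]
  constructor
  · intro h c _ hcc hcr
    have h1 := h (c : Int) (by rw [PySem.List.mem_pyRange_one]; omega)
    simp only [Bool.not_eq_eq_eq_not, Bool.not_true, Bool.and_eq_false_iff] at h1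
    rcases h1 with h1 | h1
    · exfalso
      simp only [pvHash, ← hrow, PySem.List.pyGetD_natCast, beq_eq_false_iff_ne, ne_eq] at h1
      exact h1 hcr
    · exact h1
  · intro h c hc
    rw [PySem.List.mem_pyRange_one] at hc
    simp only [Bool.not_eq_eq_eq_not, Bool.not_true, Bool.and_eq_false_iff]
    by_cases hk : pvHash key r c = true
    · right
      rw [show c = ((c.toNat : Nat) : Int) from by omega] at hk ⊢
      simp only [pvHash, ← hrow, PySem.List.pyGetD_natCast, beq_iff_eq] at hk
      exact h c.toNat (by omega) (by omega) hk
    · left; simpa using hk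

-- the outer loops agree row by row
lemma pvRowLoops_eq (key lock : List String) (cols : Int) (rs : List Int) :
    pvRowLoop key lock cols rs = pvRowLoopB key lock cols rs := by
  induction rs with
  | nil => rfl
  | cons r rs ih =>
    simp only [pvRowLoop, pvRowLoopB]
    rw [pvRow_eq key lock cols r, ih]

-- ===== VERDICT (by name: the statement is the Claim_ definition above) =====
theorem try_key_spec : Claim_equal_try_key := by
  intro key lock _ _
  unfold Spec_try_key try_key try_key_alt
  exact pvRowLoops_eq key lock _ _
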